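-- pv_equiv track=rewrite | github.com/asweigart/programmedpatterns | book/visualpatterns.py | pattern69
-- ===== SOURCE A (Python) =====
-- def pattern69(step):
--     width = 4
--     height = 3
--     for i in range(2, step + 1):
--         if i % 2 == 0:
--             width += 2
--             height += 1
--         elif i % 2 == 1:
--             height += 1
--     row = ('O' * width) + '\n'
--     pattern = row * height
--     return pattern
-- ===== SOURCE B (Python) =====
-- def pattern69(step):
--     height = 3 + max(0, step - 1)
--     width = 4 + 2 * max(0, step // 2)
--     return ('O' * width + '\n') * height
-- ===== Notes on version B (the rewrite author's own statement) =====
-- stated objective: simpler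
-- what changed: Replaced the counting loop over the range with closed-form arithmetic for the rectangle's width and height (clamped at the base case), then builds the output string directly.
import Mathlib
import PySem

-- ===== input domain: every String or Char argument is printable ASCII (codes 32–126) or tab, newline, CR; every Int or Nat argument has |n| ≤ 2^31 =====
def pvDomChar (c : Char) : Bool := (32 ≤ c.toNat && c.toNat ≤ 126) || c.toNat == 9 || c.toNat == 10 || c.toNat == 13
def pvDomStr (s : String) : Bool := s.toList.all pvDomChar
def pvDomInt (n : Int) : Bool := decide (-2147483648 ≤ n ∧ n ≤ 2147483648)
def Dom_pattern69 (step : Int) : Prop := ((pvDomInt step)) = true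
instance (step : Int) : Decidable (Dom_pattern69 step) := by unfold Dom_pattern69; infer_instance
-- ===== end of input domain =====

-- B replaces A's counting loop by closed-form width/height (simpler, no loop besides building the output).

-- ===== PORT A =====
def pattern69 (step : Int) : String :=
  let wh := (PySem.List.pyRange 2 (step + 1) 1).foldl
    (fun (wh : Int × Int) i =>
      if PySem.Int.mod i 2 = 0 then (wh.1 + 2, wh.2 + 1)
      else if PySem.Int.mod i 2 = 1 then (wh.1, wh.2 + 1)
      else wh) (4, 3)
  let row := PySem.List.pyRepeat ['O'] wh.1 ++ ['\n']
  String.ofList (PySem.List.pyRepeat row wh.2)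

-- ===== PORT B =====
def pattern69_alt (step : Int) : String :=
  let height := 3 + max 0 (step - 1)
  let width := 4 + 2 * max 0 (PySem.Int.floordiv step 2)
  String.ofList (PySem.List.pyRepeat (PySem.List.pyRepeat ['O'] width ++ ['\n']) height)

-- ===== PRECONDITION & SPEC =====
def Spec_pattern69 (step : Int) (out : String) : Prop := out = pattern69_alt step
instance (step : Int) (out : String) : Decidable (Spec_pattern69 step out) := by unfold Spec_pattern69; infer_instance

-- ===== CLAIM (what is proved, stated in full; the proofs are below) =====
def Claim_equal_pattern69 : Prop := ∀ (step : Int), Dom_pattern69 step → Spec_pattern69 step (pattern69 step)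

-- ===== LEMMAS AND PROOFS =====

-- The loop's accumulator after running over range(2, step+1), in closed form.
theorem pattern69_fold_closed (n : Nat) :
    (PySem.List.pyRange 2 ((1 : Int) + n + 1) 1).foldl
      (fun (wh : Int × Int) i =>
        if PySem.Int.mod i 2 = 0 then (wh.1 + 2, wh.2 + 1)
        else if PySem.Int.mod i 2 = 1 then (wh.1, wh.2 + 1)
        else wh) (4, 3)
    = (4 + 2 * max 0 (PySem.Int.floordiv ((1 : Int) + n) 2), 3 + max 0 ((1 : Int) + n - 1)) := by
  have fd2 : ∀ a : Int, PySem.Int.floordiv a 2 = a / 2 := by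
    intro a
    simp [PySem.Int.floordiv]
    rw [Int.fdiv_eq_ediv]
    norm_num
  induction n with
  | zero =>
      rw [PySem.List.pyRange_one_eq_nil (by norm_num)]
      simp [fd2]
  | succ k ih =>
      have h1 : ((1 : Int) + ((k : Nat) + 1 : Nat) + 1) = ((1 : Int) + k + 1) + 1 := by
        push_cast; ring
      rw [h1, PySem.List.pyRange_one_succ_right (by push_cast; omega), List.foldl_append, ih]
      simp only [List.foldl_cons, List.foldl_nil]
      have hm : PySem.Int.mod ((1 : Int) + k + 1) 2 = ((1 : Int) + k + 1) % 2 := by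
        simp only [PySem.Int.mod]
        rw [Int.fmod_eq_emod]
        norm_num
      rcases Int.emod_two_eq ((1 : Int) + k + 1) with he | ho
      · rw [hm, he]
        norm_num
        refine ⟨?_, ?_⟩ <;> (try simp only [fd2]) <;> push_cast <;> omega
      · rw [hm, ho]
        norm_num
        refine ⟨?_, ?_⟩ <;> (try simp only [fd2]) <;> push_cast <;> omega

theorem pattern69_spec_aux (step : Int) : pattern69 step = pattern69_alt step := by
  unfold pattern69 pattern69_alt
  by_cases h : step ≤ 0
  · rw [PySem.List.pyRange_one_eq_nil (by omega)]
    have hw : max 0 (PySem.Int.floordiv step 2) = 0 := by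
      have hle : PySem.Int.floordiv step 2 ≤ 0 := by
        simp only [PySem.Int.floordiv]
        rw [Int.fdiv_eq_ediv]
        split_ifs <;> omega
      omega
    have hh : max 0 (step - 1) = 0 := by omega
    simp only [List.foldl_nil, hw, hh]
    norm_num
  · obtain ⟨n, hn⟩ : ∃ n : Nat, step = (1 : Int) + n := ⟨(step - 1).toNat, by omega⟩
    subst hn
    rw [pattern69_fold_closed n]

-- ===== VERDICT (by name: the statement is the Claim_ definition above) =====
theorem pattern69_spec : Claim_equal_pattern69 := by
  intro step _
  exact pattern69_spec_aux step
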